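-- pv_equiv track=rewrite | github.com/Boundless-Studios/gaia-free | scripts/backend/backup_prompts_to_sql.py | escape_sql_string
-- ===== SOURCE A (Python) =====
-- def escape_sql_string(value: str) -> str:
--     """Escape a string for use in SQL."""
--     if value is None:
--         return 'NULL'
--     # Use dollar-quoting for prompt text to avoid escaping issues
--     # Find a unique delimiter that doesn't appear in the text
--     delimiter = "PROMPT"
--     counter = 0
--     while f"${delimiter}$" in value:
--         counter += 1
--         delimiter = f"PROMPT{counter}"
--     return f"${delimiter}${value}${delimiter}$"
-- ===== SOURCE B (Python) =====
-- def _taken_suffix_at(value, i):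
--     """Digit suffix s if value[i:] starts with a '$PROMPT<s>$' delimiter, else None."""
--     if not value.startswith('$PROMPT', i):
--         return None
--     j = i + 7
--     while j < len(value) and value[j].isdigit():
--         j += 1
--     if j < len(value) and value[j] == '$':
--         return value[i + 7:j]
--     return None
--
-- def escape_sql_string(value):
--     """Escape a string for use in SQL using dollar-quoting: scan the text once,
--     collect the digit suffixes of every '$PROMPT<digits>$' delimiter it already
--     contains, then quote with the first free counter suffix ('', '1', '2', ...)."""
--     if value is None:
--         return 'NULL'
--     taken = set()
--     for i in range(len(value)):
--         s = _taken_suffix_at(value, i)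
--         if s is not None:
--             taken.add(s)
--     counter = 0
--     suffix = ''
--     while suffix in taken:
--         counter += 1
--         suffix = str(counter)
--     return f'$PROMPT{suffix}${value}$PROMPT{suffix}$'
-- ===== Notes on version B (the rewrite author's own statement) =====
-- stated objective: alternative
-- what changed: Instead of repeatedly re-scanning the whole text for a dollar-quoted delimiter with a growing counter, B scans the text once, collecting the set of digit suffixes of the '$PROMPT<digits>$' delimiters already present, and then returns with the first counter whose suffix is not in that set.
import Mathlib
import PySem

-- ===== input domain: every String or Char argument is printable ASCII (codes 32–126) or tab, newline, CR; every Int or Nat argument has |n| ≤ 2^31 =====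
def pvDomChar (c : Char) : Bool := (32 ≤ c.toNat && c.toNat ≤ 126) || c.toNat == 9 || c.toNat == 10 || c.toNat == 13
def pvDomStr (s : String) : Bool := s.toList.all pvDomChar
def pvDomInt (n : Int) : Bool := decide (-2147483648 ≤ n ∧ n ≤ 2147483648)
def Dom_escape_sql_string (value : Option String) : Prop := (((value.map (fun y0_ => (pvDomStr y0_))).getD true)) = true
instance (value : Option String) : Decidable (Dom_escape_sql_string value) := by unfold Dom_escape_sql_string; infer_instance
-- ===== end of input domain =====

-- B replaces A's repeated whole-text substring scans with ONE left-to-right scan collecting the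
-- set of digit suffixes of the '$PROMPT<digits>$' delimiters already in the text, then takes the
-- first free counter suffix. Same return value on every input; objective: alternative.

-- "PROMPT" as a list of characters (shared literal of both ports)
def pvPROMPT : List Char := ['P', 'R', 'O', 'M', 'P', 'T']

-- ===== PORT A =====
-- A's while loop; the fuel argument only makes the recursion total (the loop always
-- exits before `v.length + 2` iterations, which the equivalence proof establishes).
def pvALoop (v : List Char) : Nat → Int → List Char → List Char
  | 0, _, delim => delim
  | fuel + 1, counter, delim =>
    if PySem.Chars.isIn ('$' :: delim ++ ['$']) v then
      pvALoop v fuel (counter + 1) (pvPROMPT ++ PySem.Int.toChars (counter + 1))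
    else delim

def escape_sql_string (value : Option String) : String :=
  match value with
  | none => "NULL"
  | some s =>
    let v := s.toList
    let delim := pvALoop v (v.length + 2) 0 pvPROMPT
    String.ofList ('$' :: delim ++ '$' :: v ++ '$' :: delim ++ ['$'])

-- ===== PORT B =====
-- `while j < n and value[j].isdigit(): j += 1`  (Char.isDigit is exact for the ASCII domain)
def pvDigitRunEnd (v : List Char) (k : Nat) : Nat :=
  if h : k < v.length ∧ (v.getD k ' ').isDigit then pvDigitRunEnd v (k + 1) else k
  termination_by v.length - k
  decreasing_by omega

-- Source B's helper _taken_suffix_at (digit suffix of a '$PROMPT<digits>$' delimiter at position i)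
def pvSuffixAt (v : List Char) (i : Nat) : Option (List Char) :=
  if PySem.Chars.startswith (v.drop i) ('$' :: pvPROMPT) then
    let k := pvDigitRunEnd v (i + 7)
    if k < v.length ∧ v.getD k ' ' = '$' then
      some (PySem.List.slice v (some ((i + 7 : Nat) : Int)) (some ((k : Nat) : Int)))
    else none
  else none

-- the `for i in range(len(value))` loop building the set `taken`
def pvTaken (v : List Char) : PySem.Set (List Char) :=
  (List.range v.length).foldl
    (fun S i => match pvSuffixAt v i with
      | some s => PySem.Set.add S s
      | none => S) []

-- Source B's while loop; fuel only makes it total (it exits within taken.length + 1 steps)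
def pvBLoop (taken : PySem.Set (List Char)) : Nat → Int → List Char → List Char
  | 0, _, suffix => suffix
  | fuel + 1, counter, suffix =>
    if suffix ∈ taken then pvBLoop taken fuel (counter + 1) (PySem.Int.toChars (counter + 1))
    else suffix

def escape_sql_string_alt (value : Option String) : String :=
  match value with
  | none => "NULL"
  | some s =>
    let v := s.toList
    let taken := pvTaken v
    let suffix := pvBLoop taken (taken.length + 1) 0 []
    String.ofList ('$' :: pvPROMPT ++ suffix ++ '$' :: v ++ '$' :: pvPROMPT ++ suffix ++ ['$'])

-- ===== PRECONDITION & SPEC =====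
def Spec_escape_sql_string (value : Option String) (out : String) : Prop := out = escape_sql_string_alt value
instance (value : Option String) (out : String) : Decidable (Spec_escape_sql_string value out) := by unfold Spec_escape_sql_string; infer_instance

-- ===== CLAIM (what is proved, stated in full; the proofs are below) =====
def Claim_equal_escape_sql_string : Prop := ∀ (value : Option String), Dom_escape_sql_string value → Spec_escape_sql_string value (escape_sql_string value)

-- ===== LEMMAS AND PROOFS =====

-- counter suffix of counter c ('' for 0, decimal digits otherwise)
def pvCanon (c : Int) : List Char := if c = 0 then [] else PySem.Int.toChars c

-- the dollar-quoted delimiter pattern carrying suffix s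
def pvPat (s : List Char) : List Char := '$' :: pvPROMPT ++ s ++ ['$']

theorem pvDigitRunEnd_eq (v : List Char) (k : Nat) :
    pvDigitRunEnd v k = k + ((v.drop k).takeWhile Char.isDigit).length := by
  fun_induction pvDigitRunEnd v k with
  | case1 k h ih =>
    obtain ⟨hk, hd⟩ := h
    rw [ih]
    rw [List.drop_eq_getElem_cons hk]
    rw [List.takeWhile_cons]
    simp [List.getD_eq_getElem?_getD, List.getElem?_eq_getElem hk] at hd
    simp [hd]
    omega
  | case2 k h =>
    rcases Nat.lt_or_ge k v.length with hk | hk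
    · have hd : (v.getD k ' ').isDigit = false := by
        by_contra hc; exact h ⟨hk, by simpa using hc⟩
      rw [List.drop_eq_getElem_cons hk, List.takeWhile_cons]
      simp [List.getD_eq_getElem?_getD, List.getElem?_eq_getElem hk] at hd
      simp [hd]
    · simp [List.drop_eq_nil_of_le hk]

theorem pvDigitChar_inj (a b : Nat) (ha : a < 10) (hb : b < 10) (h : Nat.digitChar a = Nat.digitChar b) : a = b := by
  interval_cases a <;> interval_cases b <;> simp_all [Nat.digitChar]

theorem pvToDigits_len_one_iff (n : Nat) : (Nat.toDigits 10 n).length = 1 ↔ n < 10 := by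
  constructor
  · intro h
    have := (Nat.length_toDigits_le_iff (b := 10) (n := n) (k := 1) (by norm_num) (by norm_num)).mp (by omega)
    simpa using this
  · intro h; rw [Nat.toDigits_of_lt_base h]; rfl

theorem pvToDigits_inj (n m : Nat) (h : Nat.toDigits 10 n = Nat.toDigits 10 m) : n = m := by
  induction n using Nat.strong_induction_on generalizing m with
  | _ n ih =>
    rcases Nat.lt_or_ge n 10 with hn | hn <;> rcases Nat.lt_or_ge m 10 with hm | hm
    · rw [Nat.toDigits_of_lt_base hn, Nat.toDigits_of_lt_base hm] at h
      exact pvDigitChar_inj n m hn hm (by simpa using h)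
    · exfalso
      have h1 : (Nat.toDigits 10 n).length = 1 := (pvToDigits_len_one_iff n).mpr hn
      have h2 : ¬ (Nat.toDigits 10 m).length = 1 := by
        rw [pvToDigits_len_one_iff]; omega
      rw [h] at h1; exact h2 h1
    · exfalso
      have h1 : (Nat.toDigits 10 m).length = 1 := (pvToDigits_len_one_iff m).mpr hm
      have h2 : ¬ (Nat.toDigits 10 n).length = 1 := by
        rw [pvToDigits_len_one_iff]; omega
      rw [h] at h2; exact h2 h1
    · rw [Nat.toDigits_eq_if (by norm_num), if_neg (by omega)] at h
      rw [Nat.toDigits_eq_if (b := 10) (n := m) (by norm_num), if_neg (by omega)] at h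
      obtain ⟨h1, h2⟩ := List.append_inj' h (by rfl)
      have hdiv : n / 10 = m / 10 := ih (n / 10) (by omega) _ h1
      have hmod : n % 10 = m % 10 :=
        pvDigitChar_inj _ _ (Nat.mod_lt _ (by norm_num)) (Nat.mod_lt _ (by norm_num)) (by simpa using h2)
      omega

theorem pvToChars_of_pos (c : Int) (hc : 0 < c) :
    PySem.Int.toChars c = Nat.toDigits 10 c.toNat := by
  unfold PySem.Int.toChars
  rw [if_neg (by omega)]

theorem pvCanon_digits (c : Int) (hc : 0 ≤ c) : (pvCanon c).all Char.isDigit = true := by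
  unfold pvCanon
  split_ifs with h
  · rfl
  · have hpos : 0 < c := lt_of_le_of_ne hc (Ne.symm h)
    rw [pvToChars_of_pos c hpos]
    rw [List.all_eq_true]
    intro x hx
    exact Nat.isDigit_of_mem_toDigits (by norm_num) (by norm_num) hx

theorem pvToDigits_ne_nil (n : Nat) : Nat.toDigits 10 n ≠ [] := by
  have := Nat.length_toDigits_pos (b := 10) (n := n); intro hc; simp [hc] at this

theorem pvCanon_inj (c d : Int) (hc : 0 ≤ c) (hd : 0 ≤ d) (h : pvCanon c = pvCanon d) : c = d := by
  unfold pvCanon at h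
  split_ifs at h with h1 h2 h2
  · omega
  · exact absurd h.symm (by rw [pvToChars_of_pos d (by omega)]; exact pvToDigits_ne_nil _)
  · exact absurd h (by rw [pvToChars_of_pos c (by omega)]; exact pvToDigits_ne_nil _)
  · rw [pvToChars_of_pos c (by omega), pvToChars_of_pos d (by omega)] at h
    have := pvToDigits_inj _ _ h
    omega

theorem pvGetD_eq (v : List Char) (i : Nat) (h : i < v.length) : v.getD i ' ' = v[i] := by
  simp [List.getD_eq_getElem?_getD, List.getElem?_eq_getElem h]

theorem pvSuffixAt_iff (v : List Char) (i : Nat) (s : List Char) :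
    pvSuffixAt v i = some s ↔ s.all Char.isDigit = true ∧ pvPat s <+: v.drop i := by
  constructor
  · intro h
    unfold pvSuffixAt at h
    by_cases h1 : PySem.Chars.startswith (v.drop i) ('$' :: pvPROMPT) = true
    case neg => rw [if_neg h1] at h; exact absurd h (by simp)
    rw [if_pos h1] at h
    obtain ⟨t, ht⟩ := (PySem.Chars.startswith_iff _ _).mp h1
    set k := pvDigitRunEnd v (i + 7) with hkdef
    by_cases h2 : k < v.length ∧ v.getD k ' ' = '$'
    case neg => rw [if_neg h2] at h; exact absurd h (by simp)
    rw [if_pos h2] at h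
    obtain ⟨hk, hD⟩ := h2
    have hkeq0 : k = i + 7 + ((v.drop (i + 7)).takeWhile Char.isDigit).length := pvDigitRunEnd_eq v (i + 7)
    have hslice : PySem.List.slice v (some ((i + 7 : Nat) : Int)) (some ((k : Nat) : Int)) = (v.drop (i + 7)).takeWhile Char.isDigit := by
      rw [PySem.List.slice_natCast, hkeq0]
      have harith : i + 7 + ((v.drop (i + 7)).takeWhile Char.isDigit).length - (i + 7) = ((v.drop (i + 7)).takeWhile Char.isDigit).length := by omega
      rw [harith]
      exact ((List.prefix_iff_eq_take).mp (List.takeWhile_prefix _)).symm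
    rw [hslice] at h
    have hts : (v.drop (i + 7)).takeWhile Char.isDigit = s := by injection h
    rw [hts] at hkeq0
    have ht7 : v.drop (i + 7) = t := by
      have h6 := congrArg (List.drop 7) ht
      rw [List.drop_drop] at h6
      simpa [pvPROMPT] using h6.symm
    refine ⟨?_, ?_⟩
    · rw [List.all_eq_true]; intro x hx
      rw [← hts] at hx
      exact List.mem_takeWhile_imp hx
    · have hdrop7 : v.drop (i + 7) = s ++ v.drop k := by
        conv_lhs => rw [← List.take_append_drop s.length (v.drop (i + 7))]
        congr 1
        · rw [← hts]
          exact ((List.prefix_iff_eq_take).mp (List.takeWhile_prefix _)).symm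
        · rw [List.drop_drop, hkeq0]
      have hdropk : v.drop k = '$' :: v.drop (k + 1) := by
        rw [List.drop_eq_getElem_cons hk]
        rw [← pvGetD_eq v k hk, hD]
      refine ⟨v.drop (k + 1), ?_⟩
      rw [← ht, ← ht7, hdrop7, hdropk]
      simp [pvPat, pvPROMPT]
  · rintro ⟨hall, t, ht⟩
    have hpat : pvPat s ++ t = ('$' :: pvPROMPT) ++ (s ++ '$' :: t) := by
      rw [pvPat]; simp
    rw [hpat] at ht
    have hsw : PySem.Chars.startswith (v.drop i) ('$' :: pvPROMPT) = true := by
      rw [PySem.Chars.startswith_iff]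
      exact ⟨_, ht⟩
    have hdrop7 : v.drop (i + 7) = s ++ '$' :: t := by
      have h6 := congrArg (List.drop 7) ht
      rw [List.drop_drop] at h6
      simpa [pvPROMPT] using h6.symm
    have hsall : s.takeWhile Char.isDigit = s := by
      rw [List.takeWhile_eq_self_iff]
      intro x hx
      exact (List.all_eq_true.mp hall) x hx
    have hds : (v.drop (i + 7)).takeWhile Char.isDigit = s := by
      rw [hdrop7, List.takeWhile_append]
      rw [hsall]
      simp
    have hkeq : pvDigitRunEnd v (i + 7) = i + 7 + s.length := by
      rw [pvDigitRunEnd_eq, hds]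
    have hdropk : v.drop (i + 7 + s.length) = '$' :: t := by
      have h5 := congrArg (List.drop s.length) hdrop7
      rw [List.drop_drop] at h5
      simpa using h5
    have hk : i + 7 + s.length < v.length := by
      by_contra hc
      rw [List.drop_eq_nil_of_le (by omega)] at hdropk
      exact absurd hdropk.symm (by simp)
    have hD : v.getD (i + 7 + s.length) ' ' = '$' := by
      rw [pvGetD_eq v _ hk]
      have hcons := List.drop_eq_getElem_cons hk (l := v)
      rw [hdropk] at hcons
      injection hcons with h2 _
      exact h2.symm
    unfold pvSuffixAt
    rw [if_pos hsw, hkeq, if_pos ⟨hk, hD⟩]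
    have hslice : PySem.List.slice v (some ((i + 7 : Nat) : Int)) (some ((i + 7 + s.length : Nat) : Int)) = s := by
      rw [PySem.List.slice_natCast]
      have harith : i + 7 + s.length - (i + 7) = s.length := by omega
      rw [harith, hdrop7]
      simp
    rw [hslice]

theorem pvMem_scan (v : List Char) (l : List Nat) (init : PySem.Set (List Char)) (y : List Char) :
    y ∈ l.foldl (fun S i => match pvSuffixAt v i with
      | some s => PySem.Set.add S s
      | none => S) init ↔ y ∈ init ∨ ∃ i ∈ l, pvSuffixAt v i = some y := by
  induction l generalizing init with
  | nil => simp
  | cons a l ih =>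
    rw [List.foldl_cons, ih]
    cases hsa : pvSuffixAt v a with
    | none =>
      constructor
      · rintro (h | ⟨i, hi, hy⟩)
        · exact Or.inl h
        · exact Or.inr ⟨i, List.mem_cons_of_mem a hi, hy⟩
      · rintro (h | ⟨i, hi, hy⟩)
        · exact Or.inl h
        · rcases List.mem_cons.mp hi with rfl | hi
          · rw [hsa] at hy; exact absurd hy (by simp)
          · exact Or.inr ⟨i, hi, hy⟩
    | some w =>
      constructor
      · rintro (h | ⟨i, hi, hy⟩)
        · rcases (PySem.Set.mem_add init w y).mp h with h | rfl
          · exact Or.inl h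
          · exact Or.inr ⟨a, by simp, hsa⟩
        · exact Or.inr ⟨i, List.mem_cons_of_mem a hi, hy⟩
      · rintro (h | ⟨i, hi, hy⟩)
        · exact Or.inl ((PySem.Set.mem_add init w y).mpr (Or.inl h))
        · rcases List.mem_cons.mp hi with rfl | hi
          · rw [hsa] at hy
            have : w = y := by injection hy
            exact Or.inl ((PySem.Set.mem_add init w y).mpr (Or.inr this.symm))
          · exact Or.inr ⟨i, hi, hy⟩

theorem pvMem_taken_iff (v : List Char) (s : List Char) :
    s ∈ pvTaken v ↔ s.all Char.isDigit = true ∧ PySem.Chars.isIn (pvPat s) v = true := by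
  unfold pvTaken
  rw [pvMem_scan]
  rw [← PySem.Chars.exists_prefix_drop_iff_isIn]
  constructor
  · rintro (h | ⟨i, _, hy⟩)
    · simp at h
    · obtain ⟨hc, hp⟩ := (pvSuffixAt_iff v i s).mp hy
      exact ⟨hc, i, hp⟩
  · rintro ⟨hc, j, hp⟩
    right
    refine ⟨j, ?_, (pvSuffixAt_iff v j s).mpr ⟨hc, hp⟩⟩
    rw [List.mem_range]
    by_contra hge
    rw [List.drop_eq_nil_of_le (by omega)] at hp
    rcases hp with ⟨t, ht⟩
    exact absurd ht (by simp [pvPat])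

theorem pvTaken_len_le (v : List Char) : (pvTaken v).length ≤ v.length := by
  unfold pvTaken
  have hgen : ∀ (l : List Nat) (init : PySem.Set (List Char)),
      (l.foldl (fun S i => match pvSuffixAt v i with
        | some s => PySem.Set.add S s
        | none => S) init).length ≤ init.length + l.length := by
    intro l
    induction l with
    | nil => simp
    | cons a l ih =>
      intro init
      rw [List.foldl_cons]
      refine le_trans (ih _) ?_
      have hstep : (match pvSuffixAt v a with
          | some s => PySem.Set.add init s
          | none => init).length ≤ init.length + 1 := by
        cases hsa : pvSuffixAt v a with
        | none => simp
        | some w =>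
          simp only []
          rw [PySem.Set.add_eq_ite]
          split_ifs <;> simp
      simp only [List.length_cons]
      omega
  have := hgen (List.range v.length) []
  simpa using this

theorem pvCanonRange_le (v : List Char) (M : Nat)
    (h : ∀ m : Nat, m < M → pvCanon (m : Int) ∈ pvTaken v) : M ≤ (pvTaken v).length := by
  have hsub : ((List.range M).map (fun m : Nat => pvCanon (m : Int))) ⊆ pvTaken v := by
    intro x hx
    rcases List.mem_map.mp hx with ⟨m, hm, rfl⟩
    exact h m (List.mem_range.mp hm)
  have hnd : ((List.range M).map (fun m : Nat => pvCanon (m : Int))).Nodup := by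
    refine List.Nodup.map_on ?_ List.nodup_range
    intro a _ b _ hab
    exact_mod_cast pvCanon_inj a b (Int.natCast_nonneg a) (Int.natCast_nonneg b) hab
  have h1 : ((List.range M).map (fun m : Nat => pvCanon (m : Int))).toFinset.card
      = ((List.range M).map (fun m : Nat => pvCanon (m : Int))).length :=
    List.toFinset_card_of_nodup hnd
  have h2 : ((List.range M).map (fun m : Nat => pvCanon (m : Int))).toFinset ⊆ (pvTaken v).toFinset := by
    intro x hx
    rw [List.mem_toFinset] at hx ⊢
    exact hsub hx
  have h3 := Finset.card_le_card h2
  have h4 := List.toFinset_card_le (pvTaken v)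
  simp only [List.length_map, List.length_range] at h1
  omega

theorem pvExists_free (v : List Char) : ∃ m : Nat, pvCanon (m : Int) ∉ pvTaken v := by
  by_contra hc
  have hall : ∀ m : Nat, pvCanon (m : Int) ∈ pvTaken v :=
    fun m => not_not.mp (fun hn => hc ⟨m, hn⟩)
  have := pvCanonRange_le v ((pvTaken v).length + 1) (fun m _ => hall m)
  omega

theorem pvFind_le (v : List Char) (hex : ∃ m : Nat, pvCanon (m : Int) ∉ pvTaken v) :
    Nat.find hex ≤ (pvTaken v).length := by
  refine pvCanonRange_le v (Nat.find hex) ?_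
  intro m hm
  have := Nat.find_min hex hm
  simpa using this

theorem pvCond_iff (v : List Char) (c : Nat) :
    PySem.Chars.isIn ('$' :: (pvPROMPT ++ pvCanon (c : Int)) ++ ['$']) v = true
      ↔ pvCanon (c : Int) ∈ pvTaken v := by
  rw [pvMem_taken_iff]
  have hpc : '$' :: (pvPROMPT ++ pvCanon (c : Int)) ++ ['$'] = pvPat (pvCanon (c : Int)) := by
    simp [pvPat]
  rw [hpc]
  constructor
  · intro h; exact ⟨pvCanon_digits _ (Int.natCast_nonneg c), h⟩
  · exact And.right

theorem pvCanon_succ (c : Nat) : PySem.Int.toChars ((c : Int) + 1) = pvCanon ((c + 1 : Nat) : Int) := by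
  rw [pvCanon, if_neg (by exact_mod_cast Nat.succ_ne_zero c)]
  norm_cast

theorem pvALoop_run (v : List Char) (hex : ∃ m : Nat, pvCanon (m : Int) ∉ pvTaken v) :
    ∀ (fuel c : Nat), c ≤ Nat.find hex → Nat.find hex - c < fuel →
      pvALoop v fuel ((c : Nat) : Int) (pvPROMPT ++ pvCanon (c : Int)) = pvPROMPT ++ pvCanon ((Nat.find hex : Nat) : Int) := by
  intro fuel
  induction fuel with
  | zero => intro c h1 h2; omega
  | succ f ih =>
    intro c h1 h2
    rw [pvALoop]
    by_cases hc : pvCanon (c : Int) ∈ pvTaken v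
    · rw [if_pos ((pvCond_iff v c).mpr hc)]
      have hclt : c < Nat.find hex := by
        rcases Nat.lt_or_ge c (Nat.find hex) with h | h
        · exact h
        · have hce : c = Nat.find hex := by omega
          subst hce
          exact absurd hc (Nat.find_spec hex)
      rw [pvCanon_succ c]
      have hcast : (c : Int) + 1 = ((c + 1 : Nat) : Int) := by norm_cast
      rw [hcast]
      exact ih (c + 1) (by omega) (by omega)
    · rw [if_neg (by rw [pvCond_iff v c]; exact hc)]
      have hce : c = Nat.find hex := by
        rcases Nat.lt_or_ge c (Nat.find hex) with h | h
        · exact absurd hc (by simpa using Nat.find_min hex h)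
        · omega
      rw [hce]

theorem pvBLoop_run (v : List Char) (hex : ∃ m : Nat, pvCanon (m : Int) ∉ pvTaken v) :
    ∀ (fuel c : Nat), c ≤ Nat.find hex → Nat.find hex - c < fuel →
      pvBLoop (pvTaken v) fuel ((c : Nat) : Int) (pvCanon (c : Int)) = pvCanon ((Nat.find hex : Nat) : Int) := by
  intro fuel
  induction fuel with
  | zero => intro c h1 h2; omega
  | succ f ih =>
    intro c h1 h2
    rw [pvBLoop]
    by_cases hc : pvCanon (c : Int) ∈ pvTaken v
    · rw [if_pos hc]
      have hclt : c < Nat.find hex := by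
        rcases Nat.lt_or_ge c (Nat.find hex) with h | h
        · exact h
        · have hce : c = Nat.find hex := by omega
          subst hce
          exact absurd hc (Nat.find_spec hex)
      rw [pvCanon_succ c]
      have hcast : (c : Int) + 1 = ((c + 1 : Nat) : Int) := by norm_cast
      rw [hcast]
      exact ih (c + 1) (by omega) (by omega)
    · rw [if_neg hc]
      have hce : c = Nat.find hex := by
        rcases Nat.lt_or_ge c (Nat.find hex) with h | h
        · exact absurd hc (by simpa using Nat.find_min hex h)
        · omega
      rw [hce]

theorem escape_sql_string_spec' : ∀ (value : Option String),
    escape_sql_string value = escape_sql_string_alt value := by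
  intro value
  cases value with
  | none => rfl
  | some s =>
    unfold escape_sql_string escape_sql_string_alt
    simp only []
    have hex := pvExists_free s.toList
    have hN := pvFind_le s.toList hex
    have hL := pvTaken_len_le s.toList
    have hA : pvALoop s.toList (s.toList.length + 2) 0 pvPROMPT
        = pvPROMPT ++ pvCanon ((Nat.find hex : Nat) : Int) := by
      have h0 : pvPROMPT = pvPROMPT ++ pvCanon ((0 : Nat) : Int) := by simp [pvCanon]
      have hc0 : (0 : Int) = ((0 : Nat) : Int) := by norm_cast
      rw [h0, hc0]
      exact pvALoop_run s.toList hex (s.toList.length + 2) 0 (Nat.zero_le _) (by omega)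
    have hB : pvBLoop (pvTaken s.toList) ((pvTaken s.toList).length + 1) 0 []
        = pvCanon ((Nat.find hex : Nat) : Int) := by
      have h0 : ([] : List Char) = pvCanon ((0 : Nat) : Int) := by simp [pvCanon]
      have hc0 : (0 : Int) = ((0 : Nat) : Int) := by norm_cast
      rw [h0, hc0]
      exact pvBLoop_run s.toList hex ((pvTaken s.toList).length + 1) 0 (Nat.zero_le _) (by omega)
    rw [hA, hB]
    congr 1
    simp

-- ===== VERDICT (by name: the statement is the Claim_ definition above) =====
theorem escape_sql_string_spec : Claim_equal_escape_sql_string := by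
  intro value _
  exact escape_sql_string_spec' value
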